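-- pv_equiv track=rewrite | github.com/hojoungjang/programming-exercises | 좋다/solution.py | solution
-- ===== SOURCE A (Python) =====
-- def solution(nums):
--     index = {num: [] for num in nums}
--     for i in range(len(nums)):
--         index[nums[i]].append(i)
--
--     count = 0
--     for i in range(len(nums)):
--         for j in range(len(nums)):
--             if i == j:
--                 continue
--
--             target = nums[i] - nums[j]
--             if target in index and index[target]:
--                 if len([idx for idx in index[target] if idx not in [i, j]]) > 0:
--                     count += 1
--                     break
--
--     return count
-- ===== SOURCE B (Python) =====
-- def solution(nums):
--     cnt = {}
--     for x in nums:
--         cnt[x] = cnt.get(x, 0) + 1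
--     count = 0
--     for x in nums:
--         for v in cnt:
--             w = x - v
--             av = cnt[v] - (1 if v == x else 0)
--             aw = cnt.get(w, 0) - (1 if w == x else 0)
--             if (av >= 2 if v == w else (av >= 1 and aw >= 1)):
--                 count += 1
--                 break
--     return count
-- ===== Notes on version B (the rewrite author's own statement) =====
-- stated objective: faster
-- what changed: A scans, for every element and every candidate partner index, the per-value index lists it built (worst-case cubic); B builds one value->count dictionary and for each element checks over the distinct values whether a copy of v and of x-v survive after excluding the element itself, by counter arithmetic alone.
import Mathlib
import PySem

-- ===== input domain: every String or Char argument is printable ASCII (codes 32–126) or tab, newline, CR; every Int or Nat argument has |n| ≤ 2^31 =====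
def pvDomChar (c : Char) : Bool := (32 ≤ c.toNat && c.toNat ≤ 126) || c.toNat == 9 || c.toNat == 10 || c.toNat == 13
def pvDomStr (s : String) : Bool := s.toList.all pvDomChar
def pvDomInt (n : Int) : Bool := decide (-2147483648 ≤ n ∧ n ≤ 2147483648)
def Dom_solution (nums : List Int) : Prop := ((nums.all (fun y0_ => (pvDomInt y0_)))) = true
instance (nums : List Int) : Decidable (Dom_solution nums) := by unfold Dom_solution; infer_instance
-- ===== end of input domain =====

-- B replaces A's inner scans over per-value index lists by counter arithmetic: for each element x it
-- asks, over the DISTINCT values v, whether a copy of v and of x-v remain after excluding x itself.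

-- ===== PORT A =====
-- inner 'for j' loop of A, with its 'continue' and 'break'
def solutionInner (nums : List Int) (index : PySem.Dict Int (List Int)) (i : Int) :
    List Int → Bool
  | [] => false
  | j :: rest =>
    if i == j then solutionInner nums index i rest
    else
      let target := PySem.List.pyGetD nums i 0 - PySem.List.pyGetD nums j 0
      if index.contains target && !((index.getD target []).isEmpty) then
        if 0 < ((index.getD target []).filter (fun idx => !([i, j].contains idx))).length then
          true
        else solutionInner nums index i rest
      else solutionInner nums index i rest

def solution (nums : List Int) : Int :=
  let index0 : PySem.Dict Int (List Int) :=
    nums.foldl (fun d num => d.insert num []) PySem.Dict.empty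
  let index : PySem.Dict Int (List Int) :=
    (PySem.List.pyRange 0 (PySem.List.len nums) 1).foldl
      (fun d i => d.modify (PySem.List.pyGetD nums i 0) [] (fun l => l ++ [i])) index0
  (PySem.List.pyRange 0 (PySem.List.len nums) 1).foldl
    (fun count i =>
      if solutionInner nums index i (PySem.List.pyRange 0 (PySem.List.len nums) 1) then
        count + 1
      else count) 0

-- ===== PORT B =====
def solution_alt (nums : List Int) : Int :=
  let cnt : PySem.Dict Int Int :=
    nums.foldl (fun d x => d.insert x (d.getD x 0 + 1)) PySem.Dict.empty
  nums.foldl (fun count x =>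
    if cnt.keys.any (fun v =>
        let w := x - v
        let av := cnt.getD v 0 - (if v == x then 1 else 0)
        let aw := cnt.getD w 0 - (if w == x then 1 else 0)
        if v == w then decide (2 ≤ av) else (decide (1 ≤ av) && decide (1 ≤ aw)))
    then count + 1 else count) 0

-- ===== PRECONDITION & SPEC =====
def Spec_solution (nums : List Int) (out : Int) : Prop := out = solution_alt nums
instance (nums : List Int) (out : Int) : Decidable (Spec_solution nums out) := by unfold Spec_solution; infer_instance

-- ===== CLAIM (what is proved, stated in full; the proofs are below) =====
def Claim_equal_solution : Prop := ∀ (nums : List Int), Dom_solution nums → Spec_solution nums (solution nums)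

-- ===== LEMMAS AND PROOFS =====

-- the list of (Int) indices of nums holding the value v, in order
def idxs (nums : List Int) (v : Int) : List Int :=
  (PySem.List.pyRange 0 (PySem.List.len nums) 1).filter
    (fun j => PySem.List.pyGetD nums j 0 == v)

theorem mem_idxs (nums : List Int) (v j : Int) :
    j ∈ idxs nums v ↔ 0 ≤ j ∧ j < PySem.List.len nums ∧ PySem.List.pyGetD nums j 0 = v := by
  simp [idxs, List.mem_filter, PySem.List.mem_pyRange_one, and_assoc]

theorem nodup_idxs (nums : List Int) (v : Int) : (idxs nums v).Nodup :=
  (PySem.List.nodup_pyRange_one 0 (PySem.List.len nums)).filter _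

theorem countIdx (l : List Int) (v : Int) :
    (List.range l.length).countP (fun k => l.getD k 0 == v) = l.count v := by
  induction l with
  | nil => simp
  | cons a t ih =>
    simp [List.range_succ_eq_map, List.countP_cons, List.countP_map, List.count_cons,
      Function.comp_def, ← ih]

theorem length_idxs (nums : List Int) (v : Int) :
    (idxs nums v).length = nums.count v := by
  unfold idxs
  rw [← List.countP_eq_length_filter, PySem.List.len_eq, PySem.List.pyRange_zero_natCast,
    List.countP_map]
  rw [← countIdx nums v]
  refine List.countP_congr (fun k _ => ?_)
  simp [PySem.List.pyGetD_natCast]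

-- A's index dict: lookup gives exactly the index list, membership of keys is membership of nums
theorem getD_indexA (nums : List Int) (t : Int) :
    ((PySem.List.pyRange 0 (PySem.List.len nums) 1).foldl
      (fun d i => d.modify (PySem.List.pyGetD nums i 0) [] (fun l => l ++ [i]))
      (nums.foldl (fun d num => d.insert num []) PySem.Dict.empty)).getD t []
    = idxs nums t := by
  have base : ∀ (l : List Int) (d : PySem.Dict Int (List Int)),
      (∀ k, d.getD k [] = []) →
      ∀ k, (l.foldl (fun d num => d.insert num []) d).getD k [] = [] := by
    intro l
    induction l with
    | nil => intro d h k; exact h k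
    | cons a tl ih =>
      intro d h k
      refine ih _ (fun k' => ?_) k
      rw [PySem.Dict.getD_insert]
      split <;> simp [h]
  have hfold :
      (PySem.List.pyRange 0 (PySem.List.len nums) 1).foldl
        (fun d i => d.modify (PySem.List.pyGetD nums i 0) [] (fun l => l ++ [i]))
        (nums.foldl (fun d num => d.insert num []) PySem.Dict.empty)
      = ((PySem.List.pyRange 0 (PySem.List.len nums) 1).map
          (fun i => (PySem.List.pyGetD nums i 0, i))).foldl
          (fun d p => d.modify p.1 [] (fun l => l ++ [p.2]))
          (nums.foldl (fun d num => d.insert num []) PySem.Dict.empty) := by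
    rw [List.foldl_map]
  rw [hfold, PySem.Dict.getD_foldl_modify_append,
    base nums PySem.Dict.empty (fun k => PySem.Dict.getD_empty k []) t]
  simp [idxs, List.filter_map, List.map_map, Function.comp_def]

theorem contains_indexA (nums : List Int) (t : Int) (h : t ∈ nums) :
    ((PySem.List.pyRange 0 (PySem.List.len nums) 1).foldl
      (fun d i => d.modify (PySem.List.pyGetD nums i 0) [] (fun l => l ++ [i]))
      (nums.foldl (fun d num => d.insert num []) PySem.Dict.empty)).contains t = true := by
  rw [PySem.Dict.contains_iff_mem_keys,
    PySem.Dict.keys_foldl_modify_key _ (fun i => PySem.List.pyGetD nums i 0) []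
      (fun _ i l => l ++ [i]),
    PySem.Dict.keys_foldl_insert _ (fun _ _ => []), PySem.Dict.keys_empty,
    PySem.Set.mem_update, PySem.Set.mem_update]
  simp [h]

-- the common characterisation: index i has two other, distinct indices summing to nums[i]
def Pex (nums : List Int) (i : Int) : Prop :=
  ∃ j k : Int, 0 ≤ j ∧ j < PySem.List.len nums ∧ 0 ≤ k ∧ k < PySem.List.len nums ∧
    j ≠ i ∧ k ≠ i ∧ k ≠ j ∧
    PySem.List.pyGetD nums j 0 + PySem.List.pyGetD nums k 0 = PySem.List.pyGetD nums i 0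

theorem innerA_iff (nums : List Int) (i : Int) :
    solutionInner nums
      ((PySem.List.pyRange 0 (PySem.List.len nums) 1).foldl
        (fun d i => d.modify (PySem.List.pyGetD nums i 0) [] (fun l => l ++ [i]))
        (nums.foldl (fun d num => d.insert num []) PySem.Dict.empty)) i
      (PySem.List.pyRange 0 (PySem.List.len nums) 1) = true ↔ Pex nums i := by
  have hany : ∀ (index : PySem.Dict Int (List Int)) (L : List Int),
      solutionInner nums index i L = true ↔ ∃ j ∈ L,
        ¬((i == j) = true) ∧
        (index.contains (PySem.List.pyGetD nums i 0 - PySem.List.pyGetD nums j 0) &&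
          !((index.getD (PySem.List.pyGetD nums i 0 - PySem.List.pyGetD nums j 0) []).isEmpty)) = true ∧
        0 < ((index.getD (PySem.List.pyGetD nums i 0 - PySem.List.pyGetD nums j 0) []).filter
            (fun idx => !([i, j].contains idx))).length := by
    intro index L
    induction L with
    | nil => simp [solutionInner]
    | cons j rest ih =>
      unfold solutionInner
      dsimp only
      split_ifs with h1 h2 h3
      · rw [ih]
        constructor
        · rintro ⟨a, ha, hq⟩; exact ⟨a, List.mem_cons_of_mem _ ha, hq⟩
        · rintro ⟨a, ha, hq⟩
          rcases List.mem_cons.1 ha with rfl | ha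
          · exact absurd h1 hq.1
          · exact ⟨a, ha, hq⟩
      · constructor
        · intro _; exact ⟨j, List.mem_cons_self, h1, h2, h3⟩
        · intro _; rfl
      · rw [ih]
        constructor
        · rintro ⟨a, ha, hq⟩; exact ⟨a, List.mem_cons_of_mem _ ha, hq⟩
        · rintro ⟨a, ha, hq⟩
          rcases List.mem_cons.1 ha with rfl | ha
          · exact absurd hq.2.2 h3
          · exact ⟨a, ha, hq⟩
      · rw [ih]
        constructor
        · rintro ⟨a, ha, hq⟩; exact ⟨a, List.mem_cons_of_mem _ ha, hq⟩
        · rintro ⟨a, ha, hq⟩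
          rcases List.mem_cons.1 ha with rfl | ha
          · exact absurd hq.2.1 h2
          · exact ⟨a, ha, hq⟩
  rw [hany]
  constructor
  · rintro ⟨j, hjmem, hj⟩
    rw [PySem.List.mem_pyRange_one] at hjmem
    simp only [beq_iff_eq, Bool.and_eq_true, Bool.not_eq_true', getD_indexA] at hj
    obtain ⟨hij, ⟨_, _⟩, hpos⟩ := hj
    rw [List.length_pos_iff_exists_mem] at hpos
    obtain ⟨k, hk⟩ := hpos
    rw [List.mem_filter] at hk
    obtain ⟨hkidx, hknot⟩ := hk
    rw [mem_idxs] at hkidx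
    refine ⟨j, k, hjmem.1, hjmem.2, hkidx.1, hkidx.2.1, Ne.symm hij, ?_, ?_, by omega⟩
    · intro h; simp [h] at hknot
    · intro h; simp [h] at hknot
  · rintro ⟨j, k, hj0, hjn, hk0, hkn, hji, hki, hkj, hsum⟩
    refine ⟨j, by rw [PySem.List.mem_pyRange_one]; exact ⟨hj0, hjn⟩, ?_⟩
    have hkmem : k ∈ idxs nums (PySem.List.pyGetD nums i 0 - PySem.List.pyGetD nums j 0) := by
      rw [mem_idxs]; exact ⟨hk0, hkn, by omega⟩
    have htmem : (PySem.List.pyGetD nums i 0 - PySem.List.pyGetD nums j 0) ∈ nums := by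
      have : PySem.List.pyGetD nums i 0 - PySem.List.pyGetD nums j 0
          = PySem.List.pyGetD nums k 0 := by omega
      rw [this]
      refine PySem.List.pyGetD_mem nums 0 ⟨by omega, ?_⟩
      rw [PySem.List.len_eq] at hkn; exact_mod_cast hkn
    simp only [beq_iff_eq, Bool.and_eq_true, Bool.not_eq_true', getD_indexA]
    refine ⟨by simp [Ne.symm hji], ⟨contains_indexA nums _ htmem, ?_⟩, ?_⟩
    · rw [List.isEmpty_eq_false_iff_exists_mem]; exact ⟨k, hkmem⟩
    · rw [List.length_pos_iff_exists_mem]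
      refine ⟨k, ?_⟩
      rw [List.mem_filter]
      exact ⟨hkmem, by simp [hki, hkj]⟩

theorem two_le_length_iff {m : List Int} (hnd : m.Nodup) :
    2 ≤ m.length ↔ ∃ a ∈ m, ∃ b ∈ m, a ≠ b := by
  constructor
  · intro h
    have h1 : 1 < m.toFinset.card := by rw [List.toFinset_card_of_nodup hnd]; omega
    obtain ⟨a, ha, b, hb, hab⟩ := Finset.one_lt_card.mp h1
    exact ⟨a, List.mem_toFinset.mp ha, b, List.mem_toFinset.mp hb, hab⟩
  · rintro ⟨a, ha, b, hb, hab⟩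
    have h1 : 1 < m.toFinset.card :=
      Finset.one_lt_card.mpr ⟨a, List.mem_toFinset.mpr ha, b, List.mem_toFinset.mpr hb, hab⟩
    rw [List.toFinset_card_of_nodup hnd] at h1
    omega

theorem av_eq (nums : List Int) (i v : Int) (hi0 : 0 ≤ i) (hin : i < PySem.List.len nums) :
    (nums.count v : Int) - (if v = PySem.List.pyGetD nums i 0 then 1 else 0)
      = ((idxs nums v).erase i).length := by
  by_cases hvx : v = PySem.List.pyGetD nums i 0
  · have himem : i ∈ idxs nums v := (mem_idxs nums v i).2 ⟨hi0, hin, hvx.symm⟩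
    have hc : 0 < (idxs nums v).length := List.length_pos_of_mem himem
    rw [List.length_erase_of_mem himem, length_idxs] at *
    rw [if_pos hvx]
    omega
  · have hnot : i ∉ idxs nums v := by
      intro h
      exact hvx ((mem_idxs nums v i).1 h).2.2.symm
    rw [List.erase_of_not_mem hnot, length_idxs, if_neg hvx]
    omega

theorem mem_erase_idxs (nums : List Int) (i v j : Int) :
    j ∈ (idxs nums v).erase i ↔
      j ≠ i ∧ 0 ≤ j ∧ j < PySem.List.len nums ∧ PySem.List.pyGetD nums j 0 = v := by
  rw [(nodup_idxs nums v).mem_erase_iff, mem_idxs]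

theorem avail_one (nums : List Int) (i v : Int) (hi0 : 0 ≤ i) (hin : i < PySem.List.len nums) :
    1 ≤ (nums.count v : Int) - (if v = PySem.List.pyGetD nums i 0 then 1 else 0) ↔
      ∃ j, 0 ≤ j ∧ j < PySem.List.len nums ∧ j ≠ i ∧ PySem.List.pyGetD nums j 0 = v := by
  rw [av_eq nums i v hi0 hin]
  constructor
  · intro h
    have : 0 < ((idxs nums v).erase i).length := by omega
    obtain ⟨j, hj⟩ := List.length_pos_iff_exists_mem.mp this
    rw [mem_erase_idxs] at hj
    exact ⟨j, hj.2.1, hj.2.2.1, hj.1, hj.2.2.2⟩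
  · rintro ⟨j, hj0, hjn, hji, hjv⟩
    have : j ∈ (idxs nums v).erase i := (mem_erase_idxs nums i v j).2 ⟨hji, hj0, hjn, hjv⟩
    have := List.length_pos_of_mem this
    omega

theorem avail_two (nums : List Int) (i v : Int) (hi0 : 0 ≤ i) (hin : i < PySem.List.len nums) :
    2 ≤ (nums.count v : Int) - (if v = PySem.List.pyGetD nums i 0 then 1 else 0) ↔
      ∃ j k, 0 ≤ j ∧ j < PySem.List.len nums ∧ 0 ≤ k ∧ k < PySem.List.len nums ∧
        j ≠ i ∧ k ≠ i ∧ k ≠ j ∧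
        PySem.List.pyGetD nums j 0 = v ∧ PySem.List.pyGetD nums k 0 = v := by
  rw [av_eq nums i v hi0 hin]
  have hnd : ((idxs nums v).erase i).Nodup := (nodup_idxs nums v).erase i
  constructor
  · intro h
    have h2 : 2 ≤ ((idxs nums v).erase i).length := by omega
    obtain ⟨a, ha, b, hb, hab⟩ := (two_le_length_iff hnd).mp h2
    rw [mem_erase_idxs] at ha hb
    exact ⟨a, b, ha.2.1, ha.2.2.1, hb.2.1, hb.2.2.1, ha.1, hb.1, Ne.symm hab, ha.2.2.2, hb.2.2.2⟩
  · rintro ⟨j, k, hj0, hjn, hk0, hkn, hji, hki, hkj, hjv, hkv⟩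
    have h2 : 2 ≤ ((idxs nums v).erase i).length :=
      (two_le_length_iff hnd).mpr
        ⟨j, (mem_erase_idxs nums i v j).2 ⟨hji, hj0, hjn, hjv⟩,
         k, (mem_erase_idxs nums i v k).2 ⟨hki, hk0, hkn, hkv⟩, Ne.symm hkj⟩
    omega

theorem condB_iff (nums : List Int) (i : Int) (hi0 : 0 ≤ i) (hin : i < PySem.List.len nums) :
    ((nums.foldl (fun d x => d.insert x (d.getD x 0 + 1)) (PySem.Dict.empty : PySem.Dict Int Int)).keys.any (fun v =>
        let x := PySem.List.pyGetD nums i 0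
        let cnt := nums.foldl (fun d x => d.insert x (d.getD x 0 + 1)) (PySem.Dict.empty : PySem.Dict Int Int)
        let w := x - v
        let av : Int := cnt.getD v 0 - (if v == x then 1 else 0)
        let aw : Int := cnt.getD w 0 - (if w == x then 1 else 0)
        if v == w then decide (2 ≤ av) else (decide (1 ≤ av) && decide (1 ≤ aw))) = true)
    ↔ Pex nums i := by
  have hlen := PySem.List.len_eq nums
  rw [List.any_eq_true]
  constructor
  · rintro ⟨v, hv, hcond⟩
    rw [PySem.Dict.keys_foldl_insert nums (fun d x => d.getD x 0 + 1) PySem.Dict.empty,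
      PySem.Dict.keys_empty, PySem.Set.mem_update] at hv
    simp only [PySem.Dict.getD_foldl_insert_add_one, PySem.Dict.getD_empty, zero_add,
      beq_iff_eq] at hcond
    by_cases hvw : v = PySem.List.pyGetD nums i 0 - v
    · rw [if_pos hvw, decide_eq_true_eq] at hcond
      obtain ⟨j, k, hj0, hjn, hk0, hkn, hji, hki, hkj, hjv, hkv⟩ :=
        (avail_two nums i v hi0 hin).1 hcond
      exact ⟨j, k, hj0, hjn, hk0, hkn, hji, hki, hkj, by omega⟩
    · rw [if_neg hvw, Bool.and_eq_true, decide_eq_true_eq, decide_eq_true_eq] at hcond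
      obtain ⟨j, hj0, hjn, hji, hjv⟩ := (avail_one nums i v hi0 hin).1 hcond.1
      obtain ⟨k, hk0, hkn, hki, hkv⟩ := (avail_one nums i _ hi0 hin).1 hcond.2
      refine ⟨j, k, hj0, hjn, hk0, hkn, hji, hki, ?_, by omega⟩
      intro h
      rw [h, hjv] at hkv
      exact hvw hkv
  · rintro ⟨j, k, hj0, hjn, hk0, hkn, hji, hki, hkj, hsum⟩
    refine ⟨PySem.List.pyGetD nums j 0, ?_, ?_⟩
    · rw [PySem.Dict.keys_foldl_insert nums (fun d x => d.getD x 0 + 1) PySem.Dict.empty,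
        PySem.Dict.keys_empty, PySem.Set.mem_update]
      right
      exact PySem.List.pyGetD_mem nums 0 ⟨by omega, by omega⟩
    · simp only [PySem.Dict.getD_foldl_insert_add_one, PySem.Dict.getD_empty, zero_add,
        beq_iff_eq]
      by_cases hvw : PySem.List.pyGetD nums j 0
          = PySem.List.pyGetD nums i 0 - PySem.List.pyGetD nums j 0
      · rw [if_pos hvw, decide_eq_true_eq]
        exact (avail_two nums i _ hi0 hin).2
          ⟨j, k, hj0, hjn, hk0, hkn, hji, hki, hkj, rfl, by omega⟩
      · rw [if_neg hvw, Bool.and_eq_true, decide_eq_true_eq, decide_eq_true_eq]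
        exact ⟨(avail_one nums i _ hi0 hin).2 ⟨j, hj0, hjn, hji, rfl⟩,
               (avail_one nums i _ hi0 hin).2 ⟨k, hk0, hkn, hki, by omega⟩⟩

-- ===== VERDICT (by name: the statement is the Claim_ definition above) =====
theorem countP_eq_countP_pyRange (nums : List Int) (q : Int → Bool) :
    nums.countP q
      = (PySem.List.pyRange 0 (PySem.List.len nums) 1).countP
          (fun i => q (PySem.List.pyGetD nums i 0)) := by
  conv_lhs => rw [← PySem.List.map_pyGetD_pyRange_zero nums 0]
  rw [List.countP_map]
  rfl

theorem solution_spec : Claim_equal_solution := by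
  intro nums _
  unfold Spec_solution solution solution_alt
  rw [PySem.List.foldl_if_add_one, PySem.List.foldl_if_add_one]
  congr 1
  rw [Nat.cast_inj]
  conv_rhs => rw [countP_eq_countP_pyRange]
  refine List.countP_congr (fun i hi => ?_)
  rw [PySem.List.mem_pyRange_one] at hi
  constructor
  · intro h
    have := (condB_iff nums i hi.1 hi.2).2 ((innerA_iff nums i).1 h)
    simpa using this
  · intro h
    exact (innerA_iff nums i).2 ((condB_iff nums i hi.1 hi.2).1 (by simpa using h))
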